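-- pv_equiv track=rewrite | github.com/armsnyder/aoc2019 | 16b.py | gen_pattern
-- ===== SOURCE A (Python) =====
-- def gen_pattern(factor, total_length):
--   base_pattern = [0, 1, 0, -1]
--   index = 0
--   remaining_yields = factor - 1
--   for _ in range(total_length):
--     if remaining_yields == 0:
--       index = (index + 1) % len(base_pattern)
--       remaining_yields = factor
--     yield base_pattern[index]
--     remaining_yields -= 1
-- ===== SOURCE B (Python) =====
-- def gen_pattern(factor, total_length):
--   base_pattern = [0, 1, 0, -1]
--   for p in range(total_length):
--     yield base_pattern[((p + 1) // factor) % 4]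
-- ===== Notes on version B (the rewrite author's own statement) =====
-- stated objective: alternative
-- what changed: Replaces the running index/remaining_yields counter state with a stateless closed-form index base_pattern[((p+1)//factor)%4] computed directly from the position; Pre_ excludes nonpositive factor, a meaningless repetition count on which A's all-zero output is an accident of its counter never reaching 0 (the closed form divides by factor, raising at factor=0).
-- outside the precondition, e.g. on gen_pattern(0, 3): A returns [0, 0, 0], B raises ZeroDivisionError; on gen_pattern(-2, 4): A returns [0, 0, 0, 0], B returns [-1, -1, 0, 0]
import Mathlib
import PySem

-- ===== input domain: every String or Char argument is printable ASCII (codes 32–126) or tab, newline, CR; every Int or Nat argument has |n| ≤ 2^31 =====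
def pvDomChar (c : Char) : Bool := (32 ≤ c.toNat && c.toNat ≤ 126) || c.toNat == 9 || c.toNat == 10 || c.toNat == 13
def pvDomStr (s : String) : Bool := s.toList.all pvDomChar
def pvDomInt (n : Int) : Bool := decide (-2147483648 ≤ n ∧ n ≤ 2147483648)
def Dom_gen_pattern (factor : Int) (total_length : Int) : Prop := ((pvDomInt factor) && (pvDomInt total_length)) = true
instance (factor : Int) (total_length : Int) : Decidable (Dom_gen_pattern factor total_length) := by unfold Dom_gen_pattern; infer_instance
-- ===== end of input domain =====

-- B replaces A's running index/remaining_yields counter state with a stateless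
-- closed-form cycle index computed from the position (alternative decomposition, same cost).

-- ===== PORT A =====
-- base_pattern = [0, 1, 0, -1]
def pvBase : List Int := [0, 1, 0, -1]

-- one iteration of A's loop body over the state (index, remaining_yields, yielded so far);
-- base_pattern[index] is ported with pyGetD (the index is provably always in [0, 4), so exact)
def pvStepA (factor : Int) (st : Int × Int × List Int) (_ : Int) : Int × Int × List Int :=
  let (index, remaining_yields, acc) := st
  if remaining_yields = 0 then
    let index := PySem.Int.mod (index + 1) 4
    (index, factor - 1, acc ++ [PySem.List.pyGetD pvBase index 0])
  else
    (index, remaining_yields - 1, acc ++ [PySem.List.pyGetD pvBase index 0])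

def gen_pattern (factor : Int) (total_length : Int) : List Int :=
  ((PySem.List.pyRange 0 total_length 1).foldl (pvStepA factor) (0, factor - 1, [])).2.2

-- ===== PORT B =====
def gen_pattern_alt (factor : Int) (total_length : Int) : List Int :=
  (PySem.List.pyRange 0 total_length 1).map (fun p =>
    PySem.List.pyGetD pvBase (PySem.Int.mod (PySem.Int.floordiv (p + 1) factor) 4) 0)

-- ===== PRECONDITION & SPEC =====
-- Pre_ excludes nonpositive factor, a meaningless repetition count on which A's all-zero
-- output is an accident of its counter never reaching 0; B's closed form divides by factor
-- there (raising ZeroDivisionError at factor = 0).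
def Pre_gen_pattern (factor : Int) (total_length : Int) : Prop := 1 ≤ factor
instance (factor : Int) (total_length : Int) : Decidable (Pre_gen_pattern factor total_length) := by unfold Pre_gen_pattern; infer_instance
def pvWitness_gen_pattern : Int × Int := (3, 10)

def Spec_gen_pattern (factor : Int) (total_length : Int) (out : List Int) : Prop := out = gen_pattern_alt factor total_length
instance (factor : Int) (total_length : Int) (out : List Int) : Decidable (Spec_gen_pattern factor total_length out) := by unfold Spec_gen_pattern; infer_instance

-- ===== CLAIM (what is proved, stated in full; the proofs are below) =====
def Claim_equal_gen_pattern : Prop := ∀ (factor : Int) (total_length : Int), Dom_gen_pattern factor total_length → Pre_gen_pattern factor total_length → Spec_gen_pattern factor total_length (gen_pattern factor total_length)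

-- ===== LEMMAS AND PROOFS =====

-- the closed-form value B yields at position p
def pvVal (factor p : Int) : Int :=
  PySem.List.pyGetD pvBase (PySem.Int.mod (PySem.Int.floordiv (p + 1) factor) 4) 0

-- when p % factor hits factor - 1, the quotient steps and the remainder resets
lemma pvDivSucc_eq (f p : Int) (hf : 1 ≤ f) (h : p % f = f - 1) :
    (p + 1) / f = p / f + 1 ∧ (p + 1) % f = 0 := by
  have hd := Int.mul_ediv_add_emod p f
  have hp1 : p + 1 = f * (p / f + 1) := by
    have : f * (p / f + 1) = f * (p / f) + f := by ring
    omega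
  refine ⟨?_, ?_⟩
  · rw [hp1, Int.mul_ediv_cancel_left _ (by omega : f ≠ 0)]
  · rw [hp1, Int.mul_emod_right]

-- otherwise the quotient is unchanged and the remainder just increments
lemma pvDivSucc_lt (f p : Int) (hf : 1 ≤ f) (h0 : 0 ≤ p % f) (h : p % f < f - 1) :
    (p + 1) / f = p / f ∧ (p + 1) % f = p % f + 1 := by
  have hd := Int.mul_ediv_add_emod p f
  have hp1 : p + 1 = (p % f + 1) + (p / f) * f := by
    have : f * (p / f) = (p / f) * f := mul_comm _ _
    omega
  have hz : (p % f + 1) / f = 0 := Int.ediv_eq_zero_of_lt (by omega) (by omega)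
  refine ⟨?_, ?_⟩
  · rw [hp1, Int.add_mul_ediv_right _ _ (by omega : f ≠ 0), hz]; ring
  · rw [hp1, mul_comm, Int.add_mul_emod_self_left, Int.emod_eq_of_lt (by omega) (by omega)]

-- factor ≥ 1: A's state before iteration p is (p//factor % 4, factor - 1 - p % factor, _)
lemma pvLoopA_pos (factor b : Int) (hf : 1 ≤ factor) : ∀ (n : Nat) (p : Int), 0 ≤ p → b - p = n →
    ∀ (acc : List Int),
    (PySem.List.pyRange p b 1).foldl (pvStepA factor)
        (PySem.Int.mod (PySem.Int.floordiv p factor) 4,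
         factor - 1 - PySem.Int.mod p factor, acc)
      = (PySem.Int.mod (PySem.Int.floordiv b factor) 4,
         factor - 1 - PySem.Int.mod b factor,
         acc ++ (PySem.List.pyRange p b 1).map (pvVal factor)) := by
  intro n
  induction n with
  | zero =>
      intro p hp hb acc
      have : b = p := by omega
      subst this
      simp [PySem.List.pyRange_one_eq_nil (le_refl b)]
  | succ n ih =>
      intro p hp hb acc
      have hpb : p < b := by omega
      rw [PySem.List.pyRange_one_cons hpb, List.foldl_cons, List.map_cons]
      have hfpos : (0 : Int) < factor := by omega
      have hfd : PySem.Int.floordiv p factor = p / factor :=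
        PySem.Int.floordiv_eq_ediv_of_pos hfpos
      have hmd : PySem.Int.mod p factor = p % factor :=
        PySem.Int.mod_eq_emod_of_pos hfpos
      have hfd1 : PySem.Int.floordiv (p + 1) factor = (p + 1) / factor :=
        PySem.Int.floordiv_eq_ediv_of_pos hfpos
      have hmd1 : PySem.Int.mod (p + 1) factor = (p + 1) % factor :=
        PySem.Int.mod_eq_emod_of_pos hfpos
      have hmodge : 0 ≤ p % factor := Int.emod_nonneg p (by omega)
      by_cases h0 : factor - 1 - PySem.Int.mod p factor = 0
      · -- p % factor = factor - 1, so factor divides p + 1: index advances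
        have hmod : p % factor = factor - 1 := by rw [hmd] at h0; omega
        obtain ⟨hdiv, hmod1⟩ := pvDivSucc_eq factor p hf hmod
        have hidx : PySem.Int.mod (PySem.Int.mod (PySem.Int.floordiv p factor) 4 + 1) 4
            = PySem.Int.mod (PySem.Int.floordiv (p + 1) factor) 4 := by
          rw [hfd, hfd1, hdiv,
              PySem.Int.mod_eq_emod_of_pos (by omega : (0:Int) < 4),
              PySem.Int.mod_eq_emod_of_pos (by omega : (0:Int) < 4),
              PySem.Int.mod_eq_emod_of_pos (by omega : (0:Int) < 4)]
          generalize p / factor = q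
          omega
        simp only [pvStepA, h0, if_true]
        rw [hidx]
        have key := ih (p + 1) (by omega) (by omega)
            (acc ++ [PySem.List.pyGetD pvBase (PySem.Int.mod (PySem.Int.floordiv (p + 1) factor) 4) 0])
        rw [hmd1, hmod1, show factor - 1 - (0:Int) = factor - 1 from by ring] at key
        rw [key]
        have hval : pvVal factor p
            = PySem.List.pyGetD pvBase (PySem.Int.mod (PySem.Int.floordiv (p + 1) factor) 4) 0 := rfl
        rw [hval]
        simp [List.append_assoc]
      · -- counter just decrements: index and p // factor are unchanged
        have hmodlt : p % factor < factor - 1 := by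
          rw [hmd] at h0
          have h1 : p % factor < factor := Int.emod_lt_of_pos p hfpos
          omega
        obtain ⟨hdiv, hmod1⟩ := pvDivSucc_lt factor p hf hmodge hmodlt
        simp only [pvStepA, h0, if_false]
        have key := ih (p + 1) (by omega) (by omega)
            (acc ++ [PySem.List.pyGetD pvBase (PySem.Int.mod (PySem.Int.floordiv p factor) 4) 0])
        rw [hmd1, hmod1, hfd1, hdiv, ← hfd] at key
        rw [hmd, show factor - 1 - p % factor - 1 = factor - 1 - (p % factor + 1) from by ring, key]
        have hval : pvVal factor p
            = PySem.List.pyGetD pvBase (PySem.Int.mod (PySem.Int.floordiv p factor) 4) 0 := by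
          simp only [pvVal, hfd, hfd1, hdiv]
        rw [hval]
        simp [List.append_assoc]

-- ===== VERDICT (by name: the statement is the Claim_ definition above) =====
theorem gen_pattern_spec : Claim_equal_gen_pattern := by
  intro factor total_length _ hf
  unfold Spec_gen_pattern gen_pattern gen_pattern_alt
  have hf1 : (1 : Int) ≤ factor := hf
  by_cases hn : total_length ≤ 0
  · simp [PySem.List.pyRange_one_eq_nil hn]
  · have hfpos : (0 : Int) < factor := by omega
    have h := pvLoopA_pos factor total_length (by omega) total_length.toNat 0 (le_refl 0)
      (by omega) []
    have h0f : PySem.Int.mod (PySem.Int.floordiv 0 factor) 4 = 0 := by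
      rw [PySem.Int.floordiv_eq_ediv_of_pos hfpos,
          PySem.Int.mod_eq_emod_of_pos (by omega : (0:Int) < 4)]
      simp
    have hm0 : PySem.Int.mod 0 factor = 0 := by
      rw [PySem.Int.mod_eq_emod_of_pos hfpos]; simp
    rw [h0f, hm0, show factor - 1 - (0:Int) = factor - 1 from by ring] at h
    rw [h]
    simp [pvVal]
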